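-- pv_equiv track=rewrite | github.com/hgsd-ops/customer_and_company_update_report | customer_monthly_report.py | truncate_update_text
-- ===== SOURCE A (Python) =====
-- def truncate_update_text(text: str, max_lines: int = 14) -> str:
--     lines = [l.rstrip() for l in text.splitlines() if l.strip()]
--
--     output = []
--     from_blocks_seen = 0
--
--     for line in lines:
--         if line.lower().startswith("fra:"):
--             from_blocks_seen += 1
--             if from_blocks_seen > 1:
--                 output.append("— tidligere e-postutveksling skjult —")
--                 break
--
--         output.append(line)
--
--         if len(output) >= max_lines:
--             output.append("— teksten er forkortet —")
--             break
--
--     return "\n".join(output)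
-- ===== SOURCE B (Python) =====
-- def _second_fra_index(lines):
--     seen = 0
--     for i, line in enumerate(lines):
--         if line.lower().startswith("fra:"):
--             seen += 1
--             if seen == 2:
--                 return i
--     return None
--
--
-- def truncate_update_text(text: str, max_lines: int = 14) -> str:
--     lines = [l.rstrip() for l in text.splitlines() if l.strip()]
--     j = _second_fra_index(lines)
--     m = max(max_lines, 1)  # A always keeps at least one line before truncating
--     if j is not None and j < m:
--         return "\n".join(lines[:j] + ["— tidligere e-postutveksling skjult —"])
--     if len(lines) >= m:
--         return "\n".join(lines[:m] + ["— teksten er forkortet —"])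
--     return "\n".join(lines)
-- ===== Notes on version B (the rewrite author's own statement) =====
-- stated objective: simpler
-- what changed: A's single fused loop that builds the output while counting sender-header blocks and breaking on two interleaved conditions is replaced by a scan that only records the index of the second sender-header line, followed by a three-way branch over list slices.
import Mathlib
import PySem

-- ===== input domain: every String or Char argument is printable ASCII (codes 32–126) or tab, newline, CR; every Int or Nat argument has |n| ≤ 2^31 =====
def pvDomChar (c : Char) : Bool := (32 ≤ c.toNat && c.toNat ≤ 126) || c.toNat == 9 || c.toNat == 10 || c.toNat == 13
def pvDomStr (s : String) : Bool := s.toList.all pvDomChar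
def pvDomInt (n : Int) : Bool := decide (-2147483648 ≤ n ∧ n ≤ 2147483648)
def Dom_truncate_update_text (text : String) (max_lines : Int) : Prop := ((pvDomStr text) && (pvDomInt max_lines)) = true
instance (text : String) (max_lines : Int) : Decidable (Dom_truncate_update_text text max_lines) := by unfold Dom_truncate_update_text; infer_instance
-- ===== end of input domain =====

-- B replaces A's fused break-driven loop by an index scan for the second 'fra:' line plus a
-- slice-based three-way branch (objective: simpler decomposition, same cost).

-- ===== PORT A =====
def pvLoopA : List String → List String → Int → Int → List String
  | [], output, _, _ => output
  | line :: rest, output, seen, max_lines =>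
    let fra := PySem.Str.startswith (PySem.Str.lower line) "fra:"
    let seen := if fra then seen + 1 else seen
    if fra ∧ 1 < seen then output ++ ["— tidligere e-postutveksling skjult —"]
    else
      let output := output ++ [line]
      if max_lines ≤ (output.length : Int) then output ++ ["— teksten er forkortet —"]
      else pvLoopA rest output seen max_lines

def truncate_update_text (text : String) (max_lines : Int) : String :=
  let lines := ((PySem.Str.splitlines text).filter (fun l => PySem.Str.strip l != "")).map PySem.Str.rstrip
  PySem.Str.join "\n" (pvLoopA lines [] 0 max_lines)

-- ===== PORT B =====
-- scan recording the index of the second 'fra:' line (Source B's _second_fra_index loop)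
def pvSecondFra : List String → Int → Int → Option Int
  | [], _, _ => none
  | line :: rest, i, seen =>
    if PySem.Str.startswith (PySem.Str.lower line) "fra:" then
      if seen + 1 == 2 then some i else pvSecondFra rest (i + 1) (seen + 1)
    else pvSecondFra rest (i + 1) seen

def truncate_update_text_alt (text : String) (max_lines : Int) : String :=
  let lines := ((PySem.Str.splitlines text).filter (fun l => PySem.Str.strip l != "")).map PySem.Str.rstrip
  let j? := pvSecondFra lines 0 0
  let m := max max_lines 1
  match j? with
  | some j =>
    if j < m then PySem.Str.join "\n" (PySem.List.slice lines none (some j) ++ ["— tidligere e-postutveksling skjult —"])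
    else if m ≤ (lines.length : Int) then PySem.Str.join "\n" (PySem.List.slice lines none (some m) ++ ["— teksten er forkortet —"])
    else PySem.Str.join "\n" lines
  | none =>
    if m ≤ (lines.length : Int) then PySem.Str.join "\n" (PySem.List.slice lines none (some m) ++ ["— teksten er forkortet —"])
    else PySem.Str.join "\n" lines

-- ===== PRECONDITION & SPEC =====
def Spec_truncate_update_text (text : String) (max_lines : Int) (out : String) : Prop := out = truncate_update_text_alt text max_lines
instance (text : String) (max_lines : Int) (out : String) : Decidable (Spec_truncate_update_text text max_lines out) := by unfold Spec_truncate_update_text; infer_instance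

-- ===== CLAIM (what is proved, stated in full; the proofs are below) =====
def Claim_equal_truncate_update_text : Prop := ∀ (text : String) (max_lines : Int), Dom_truncate_update_text text max_lines → Spec_truncate_update_text text max_lines (truncate_update_text text max_lines)

-- ===== LEMMAS AND PROOFS =====

-- what B's branch computes, as a list of lines (phrased with take; related to slices at the end)
def pvCore (lines : List String) (j? : Option Int) (r : Int) : List String :=
  let m := max r 1
  match j? with
  | some j =>
    if j < m then lines.take j.toNat ++ ["— tidligere e-postutveksling skjult —"]
    else if m ≤ (lines.length : Int) then lines.take m.toNat ++ ["— teksten er forkortet —"]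
    else lines
  | none =>
    if m ≤ (lines.length : Int) then lines.take m.toNat ++ ["— teksten er forkortet —"]
    else lines

lemma pvSecondFra_shift (lines : List String) (i seen : Int) :
    pvSecondFra lines i seen = (pvSecondFra lines 0 seen).map (· + i) := by
  induction lines generalizing i seen with
  | nil => simp [pvSecondFra]
  | cons line rest ih =>
    simp only [pvSecondFra]
    split_ifs with h1 h2
    · simp
    · rw [ih (i+1), ih (0+1)]
      cases pvSecondFra rest 0 (seen+1) <;> (simp; try ring)
    · rw [ih (i+1), ih (0+1)]
      cases pvSecondFra rest 0 seen <;> (simp; try ring)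

lemma pvSecondFra_nonneg (lines : List String) (seen : Int) (j : Int)
    (h : pvSecondFra lines 0 seen = some j) : 0 ≤ j := by
  induction lines generalizing seen j with
  | nil => simp [pvSecondFra] at h
  | cons line rest ih =>
    simp only [pvSecondFra] at h
    split_ifs at h with h1 h2
    · simp at h; omega
    · rw [pvSecondFra_shift] at h
      cases hr : pvSecondFra rest 0 (seen+1) with
      | none => simp [hr] at h
      | some j' => simp [hr] at h; have := ih _ _ hr; omega
    · rw [pvSecondFra_shift] at h
      cases hr : pvSecondFra rest 0 seen with
      | none => simp [hr] at h
      | some j' => simp [hr] at h; have := ih _ _ hr; omega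

lemma pvCore_step (line : String) (rest : List String) (j? : Option Int) (r : Int)
    (hj : ∀ j ∈ j?, 0 ≤ j) :
    pvCore (line :: rest) (j?.map (· + 1)) r =
      if r ≤ 1 then line :: ["— teksten er forkortet —"]
      else line :: pvCore rest j? (r - 1) := by
  by_cases hr : r ≤ 1
  · have hm : max r 1 = 1 := by omega
    rcases j? with _ | j
    · simp only [Option.map_none, pvCore, hm, if_pos hr]
      rw [if_pos (by simp)]
      simp [List.take]
    · have hj0 : 0 ≤ j := hj j rfl
      simp only [Option.map_some, pvCore, hm, if_pos hr]
      rw [if_neg (by omega), if_pos (by simp)]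
      simp [List.take]
  · have hm : max r 1 = r := by omega
    have hm' : max (r - 1) 1 = r - 1 := by omega
    have ht : r.toNat = (r - 1).toNat + 1 := by omega
    rcases j? with _ | j
    · simp only [Option.map_none, pvCore, hm, hm', if_neg hr, List.length_cons,
        Nat.cast_add, Nat.cast_one]
      split_ifs <;> first | rfl | (exfalso; omega) | (rw [ht]; simp [List.take_succ_cons])
    · have hj0 : 0 ≤ j := hj j rfl
      have htj : (j + 1).toNat = j.toNat + 1 := by omega
      simp only [Option.map_some, pvCore, hm, hm', if_neg hr, List.length_cons,
        Nat.cast_add, Nat.cast_one]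
      split_ifs <;> first | rfl | (exfalso; omega) | (rw [htj]; simp [List.take_succ_cons]) | (rw [ht]; simp [List.take_succ_cons])

lemma pvLoopA_eq_core (lines : List String) (output : List String) (seen m : Int)
    (hs : seen = 0 ∨ seen = 1) :
    pvLoopA lines output seen m =
      output ++ pvCore lines (pvSecondFra lines 0 seen) (m - output.length) := by
  induction lines generalizing output seen m with
  | nil =>
    simp only [pvLoopA, pvSecondFra, pvCore]
    rw [if_neg (by simp)]
    simp
  | cons line rest ih =>
    by_cases hf : PySem.Str.startswith (PySem.Str.lower line) "fra:" = true
    · rcases hs with h0 | h1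
      · subst h0
        have hnn : ∀ j ∈ pvSecondFra rest 0 1, 0 ≤ j := fun j hj => pvSecondFra_nonneg rest 1 j hj
        simp only [pvLoopA, pvSecondFra, hf]
        norm_num
        rw [pvSecondFra_shift, ih _ _ _ (Or.inr rfl), pvCore_step _ _ _ _ hnn]
        by_cases hm : m ≤ (output.length : Int) + 1
        · rw [if_pos hm, if_pos (by omega)]
        · rw [if_neg hm, if_neg (by omega)]
          have hr : m - (((output ++ [line]).length : Nat) : Int) = m - (output.length : Int) - 1 := by
            simp; omega
          rw [hr]
          simp
      · subst h1
        simp only [pvLoopA, pvSecondFra, hf]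
        norm_num
        simp only [pvCore]
        rw [if_pos (by omega)]
        simp
    · have hnn : ∀ j ∈ pvSecondFra rest 0 seen, 0 ≤ j := fun j hj => pvSecondFra_nonneg rest seen j hj
      simp only [pvLoopA, pvSecondFra, hf]
      norm_num [hf]
      rw [pvSecondFra_shift, ih _ _ _ hs, pvCore_step _ _ _ _ hnn]
      by_cases hm : m ≤ (output.length : Int) + 1
      · rw [if_pos hm, if_pos (by omega)]
      · rw [if_neg hm, if_neg (by omega)]
        have hr : m - (((output ++ [line]).length : Nat) : Int) = m - (output.length : Int) - 1 := by
          simp; omega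
        rw [hr]
        simp

-- ===== VERDICT (by name: the statement is the Claim_ definition above) =====
theorem truncate_update_text_spec : Claim_equal_truncate_update_text := by
  intro text max_lines _
  simp only [Spec_truncate_update_text, truncate_update_text, truncate_update_text_alt]
  rw [pvLoopA_eq_core _ _ _ _ (Or.inl rfl)]
  simp only [List.nil_append, List.length_nil, Nat.cast_zero, sub_zero]
  generalize hL : ((PySem.Str.splitlines text).filter (fun l => PySem.Str.strip l != "")).map PySem.Str.rstrip = L
  cases hj : pvSecondFra L 0 0 with
  | none =>
    simp only [pvCore]
    rw [PySem.List.slice_to]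
    · split_ifs <;> rfl
    · omega
  | some j =>
    have hj0 := pvSecondFra_nonneg L 0 j hj
    simp only [pvCore]
    rw [PySem.List.slice_to, PySem.List.slice_to]
    · split_ifs <;> rfl
    · omega
    · omega
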